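-- pv_equiv track=rewrite | github.com/benhid/Sequoya | pym2sa/core/solution.py | __get_gaps_group_of_sequence
-- ===== SOURCE A (Python) =====
-- def __get_gaps_group_of_sequence(sequence: str) -> list:
--     gaps_group = []
--     gap_open = False
--     start = 0
--
--     for i in range(len(sequence)):
--         if sequence[i] is '-':
--             if not gap_open:
--                 gap_open = True
--                 start = i
--         else:
--             if gap_open:
--                 gap_open = False
--
--                 # e.g. [1, 2, 5, 6] means there are two gaps groups:
--                 #   the first one from (1,2) and the second one from (5,6)
--                 gaps_group.append(start)
--                 gaps_group.append(i - 1)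
--
--     if gap_open:
--         gaps_group.append(start)
--         gaps_group.append(len(sequence) - 1)
--
--     return gaps_group
-- ===== SOURCE B (Python) =====
-- def __get_gaps_group_of_sequence(sequence: str) -> list:
--     # Stateless boundary test per position instead of A's gap_open state machine:
--     # a '-' with no '-' before it starts a group, a '-' with no '-' after it ends one.
--     n = len(sequence)
--     gaps_group = []
--     for i, c in enumerate(sequence):
--         if c == '-':
--             if i == 0 or sequence[i - 1] != '-':
--                 gaps_group.append(i)
--             if i == n - 1 or sequence[i + 1] != '-':
--                 gaps_group.append(i)
--     return gaps_group
-- ===== Notes on version B (the rewrite author's own statement) =====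
-- stated objective: alternative
-- what changed: Replaced A's stateful gap_open/start scan with end-of-string flush by a stateless per-position boundary test (a '-' whose left neighbour is not '-' starts a group, one whose right neighbour is not '-' ends it), emitting indices directly.
import Mathlib
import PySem

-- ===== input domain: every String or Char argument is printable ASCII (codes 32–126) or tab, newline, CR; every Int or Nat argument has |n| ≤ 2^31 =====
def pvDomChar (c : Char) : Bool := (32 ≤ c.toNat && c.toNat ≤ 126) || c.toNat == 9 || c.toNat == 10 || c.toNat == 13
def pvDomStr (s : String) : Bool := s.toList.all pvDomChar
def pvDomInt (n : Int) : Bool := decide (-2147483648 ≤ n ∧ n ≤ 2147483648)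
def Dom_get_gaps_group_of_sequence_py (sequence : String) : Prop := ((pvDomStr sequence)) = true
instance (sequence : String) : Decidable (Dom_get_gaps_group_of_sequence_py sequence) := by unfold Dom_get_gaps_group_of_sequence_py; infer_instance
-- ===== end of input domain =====

-- B replaces A's gap_open/start state machine by a stateless per-position boundary test; same O(n) cost (objective: alternative).
-- Note: A compares with `is`, which on CPython's interned 1-char strings behaves as `==`; ported as equality.

-- ===== PORT A =====
-- for i in range(len(sequence)) reading sequence[i] becomes structural recursion over
-- the character list carrying the index i and the loop state (gaps_group, gap_open, start).
def aLoop (cs : List Char) (i : Int) (gaps_group : List Int) (gap_open : Bool) (start : Int) : List Int :=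
  match cs with
  | [] => if gap_open then gaps_group ++ [start, i - 1] else gaps_group
  | c :: rest =>
    if c = '-' then
      if ¬ gap_open then aLoop rest (i + 1) gaps_group true i
      else aLoop rest (i + 1) gaps_group gap_open start
    else
      if gap_open then aLoop rest (i + 1) (gaps_group ++ [start, i - 1]) false start
      else aLoop rest (i + 1) gaps_group gap_open start

def get_gaps_group_of_sequence_py (sequence : String) : List Int :=
  aLoop sequence.toList 0 [] false 0

-- ===== PORT B =====
-- B's loop over enumerate(sequence) with neighbour reads sequence[i-1] / sequence[i+1]:
-- recursion carrying prevDash (= i > 0 and sequence[i-1] == '-'); sequence[i+1] is rest.head?.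
def bLoop (cs : List Char) (prevDash : Bool) (i : Int) : List Int :=
  match cs with
  | [] => []
  | c :: rest =>
    (if c = '-' then
      (if ¬ prevDash then [i] else []) ++
      (if rest.head? ≠ some '-' then [i] else [])
     else []) ++ bLoop rest (c = '-') (i + 1)

def get_gaps_group_of_sequence_py_alt (sequence : String) : List Int :=
  bLoop sequence.toList false 0

-- ===== PRECONDITION & SPEC =====
def Spec_get_gaps_group_of_sequence_py (sequence : String) (out : List Int) : Prop := out = get_gaps_group_of_sequence_py_alt sequence
instance (sequence : String) (out : List Int) : Decidable (Spec_get_gaps_group_of_sequence_py sequence out) := by unfold Spec_get_gaps_group_of_sequence_py; infer_instance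

-- ===== CLAIM (what is proved, stated in full; the proofs are below) =====
def Claim_equal_get_gaps_group_of_sequence_py : Prop := ∀ (sequence : String), Dom_get_gaps_group_of_sequence_py sequence → Spec_get_gaps_group_of_sequence_py sequence (get_gaps_group_of_sequence_py sequence)

-- ===== LEMMAS AND PROOFS =====

-- When a gap is open entering state (cs, i), B has already emitted the group's start, and
-- (since B emits a group's end while processing its last '-') the pending end i-1 if cs does
-- not continue the run.  pendB packages B's remaining output in that situation.
def pendB (cs : List Char) (i : Int) : List Int :=
  match cs with
  | [] => [i - 1]
  | c :: _ => if c = '-' then bLoop cs true i else (i - 1) :: bLoop cs true i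

lemma aLoop_bLoop (cs : List Char) : ∀ (i : Int) (acc : List Int) (start : Int),
    aLoop cs i acc false start = acc ++ bLoop cs false i ∧
    aLoop cs i acc true start = acc ++ start :: pendB cs i := by
  induction cs with
  | nil => intro i acc start; simp [aLoop, bLoop, pendB]
  | cons c rest ih =>
    intro i acc start
    by_cases hc : c = '-'
    · subst hc
      constructor
      · -- closed, sees '-': opens with start := i
        rw [show aLoop ('-' :: rest) i acc false start = aLoop rest (i+1) acc true i from by
          simp [aLoop]]
        rw [(ih (i+1) acc i).2]
        cases rest with
        | nil => simp [bLoop, pendB]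
        | cons d rs =>
          by_cases hd : d = '-' <;>
            simp [bLoop, pendB, hd]
      · -- open, sees '-': stays open
        rw [show aLoop ('-' :: rest) i acc true start = aLoop rest (i+1) acc true start from by
          simp [aLoop]]
        rw [(ih (i+1) acc start).2]
        cases rest with
        | nil => simp [bLoop, pendB]
        | cons d rs =>
          by_cases hd : d = '-' <;>
            simp [bLoop, pendB, hd]
    · constructor
      · rw [show aLoop (c :: rest) i acc false start = aLoop rest (i+1) acc false start from by
          simp [aLoop, hc]]
        rw [(ih (i+1) acc start).1]
        simp [bLoop, hc]
      · rw [show aLoop (c :: rest) i acc true start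
              = aLoop rest (i+1) (acc ++ [start, i - 1]) false start from by
          simp [aLoop, hc]]
        rw [(ih (i+1) (acc ++ [start, i-1]) start).1]
        simp [bLoop, pendB, hc]

-- ===== VERDICT (by name: the statement is the Claim_ definition above) =====
theorem get_gaps_group_of_sequence_py_spec : Claim_equal_get_gaps_group_of_sequence_py := by
  intro s _
  unfold Spec_get_gaps_group_of_sequence_py get_gaps_group_of_sequence_py get_gaps_group_of_sequence_py_alt
  simpa using (aLoop_bLoop s.toList 0 [] 0).1
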